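-- pv_equiv track=rewrite | github.com/grupyrp/dojos | 2019-04-18/programa.py | sacar2
-- ===== SOURCE A (Python) =====
-- notas_disponiveis = [100, 50, 20, 10]
--
-- def sacar2(valor):
--
--     if valor <= 0:
--         return None
--
--     if valor % 10 > 0:
--         return None
--
--     saque = []
--     for nota in notas_disponiveis:
--         while valor:
--             if valor >= nota:
--                 valor -= nota
--                 saque.append(nota)
--             else:
--                 break
--
--     return saque
-- ===== SOURCE B (Python) =====
-- notas_disponiveis = [100, 50, 20, 10]
--
-- def sacar2(valor):
--     if valor <= 0 or valor % 10 > 0: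
--         return None
--     saque = []
--     for nota in notas_disponiveis:
--         q, valor = divmod(valor, nota)
--         saque += [nota] * q
--     return saque
-- ===== Notes on version B (the rewrite author's own statement) =====
-- stated objective: simpler
-- what changed: Replaces the inner one-note-at-a-time while loop with a closed-form divmod per denomination, extending the result with [nota]*q.
import Mathlib
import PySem

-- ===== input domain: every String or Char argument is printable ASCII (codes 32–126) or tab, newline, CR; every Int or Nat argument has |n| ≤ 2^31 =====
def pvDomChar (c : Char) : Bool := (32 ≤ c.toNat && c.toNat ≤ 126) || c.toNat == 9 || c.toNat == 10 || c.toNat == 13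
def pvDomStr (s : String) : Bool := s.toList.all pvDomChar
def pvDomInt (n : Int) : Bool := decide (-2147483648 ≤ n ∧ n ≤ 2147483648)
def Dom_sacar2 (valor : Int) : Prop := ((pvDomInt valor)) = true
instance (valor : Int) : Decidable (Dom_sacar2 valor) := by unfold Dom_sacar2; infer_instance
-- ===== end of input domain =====

-- B replaces A's inner one-note-at-a-time while loop with a closed-form divmod per denomination (simpler).

-- ===== PORT A =====
-- inner 'while valor: if valor >= nota: valor -= nota; saque.append(nota) else: break';
-- the '0 < nota' conjunct is a totality guard only (every denomination is positive)
def sacar2Loop (nota valor : Int) (saque : List Int) : Int × List Int :=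
  if _h : valor ≠ 0 ∧ nota ≤ valor ∧ 0 < nota then
    sacar2Loop nota (valor - nota) (saque ++ [nota])
  else (valor, saque)
termination_by valor.toNat
decreasing_by omega

def sacar2 (valor : Int) : Option (List Int) :=
  if valor ≤ 0 then none
  else if PySem.Int.mod valor 10 > 0 then none
  else
    let r := List.foldl (fun (s : Int × List Int) nota => sacar2Loop nota s.1 s.2)
      (valor, []) [100, 50, 20, 10]
    some r.2

-- ===== PORT B =====
-- '[nota] * q' for an int q: empty when q ≤ 0, hence q.toNat
def sacar2_alt (valor : Int) : Option (List Int) :=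
  if valor ≤ 0 ∨ PySem.Int.mod valor 10 > 0 then none
  else
    let r := List.foldl
      (fun (s : Int × List Int) nota =>
        (PySem.Int.mod s.1 nota,
         s.2 ++ List.replicate (PySem.Int.floordiv s.1 nota).toNat nota))
      (valor, []) [100, 50, 20, 10]
    some r.2

-- ===== PRECONDITION & SPEC =====
def Spec_sacar2 (valor : Int) (out : Option (List Int)) : Prop := out = sacar2_alt valor
instance (valor : Int) (out : Option (List Int)) : Decidable (Spec_sacar2 valor out) := by unfold Spec_sacar2; infer_instance

-- ===== CLAIM (what is proved, stated in full; the proofs are below) =====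
def Claim_equal_sacar2 : Prop := ∀ (valor : Int), Dom_sacar2 valor → Spec_sacar2 valor (sacar2 valor)

-- ===== LEMMAS AND PROOFS =====

-- A's inner while loop computes mod/floordiv in closed form (for 0 ≤ valor, 0 < nota)
theorem sacar2Loop_closed (nota valor : Int) (hn : 0 < nota) (hv : 0 ≤ valor) (saque : List Int) :
    sacar2Loop nota valor saque
      = (PySem.Int.mod valor nota,
         saque ++ List.replicate (PySem.Int.floordiv valor nota).toNat nota) := by
  fun_induction sacar2Loop nota valor saque with
  | case1 valor saque h ih =>
    obtain ⟨h0, hle, _⟩ := h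
    rw [ih (by omega)]
    rw [PySem.Int.mod_eq_emod_of_pos hn, PySem.Int.mod_eq_emod_of_pos hn,
        PySem.Int.floordiv_eq_ediv_of_pos hn, PySem.Int.floordiv_eq_ediv_of_pos hn]
    have hm : (valor - nota) % nota = valor % nota := Int.sub_emod_right valor nota
    have hd : valor / nota = (valor - nota) / nota + 1 := by
      have h := Int.add_mul_ediv_right (valor - nota) 1 (show nota ≠ 0 by omega)
      rw [one_mul, sub_add_cancel] at h
      exact h
    have hdn : 0 ≤ (valor - nota) / nota := Int.ediv_nonneg (by omega) (by omega)
    rw [hm, hd]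
    have : (((valor - nota) / nota + 1)).toNat = ((valor - nota) / nota).toNat + 1 := by omega
    rw [this, List.replicate_succ]
    simp
  | case2 valor saque h =>
    have hlt : valor < nota := by omega
    rw [PySem.Int.mod_eq_emod_of_pos hn, PySem.Int.floordiv_eq_ediv_of_pos hn,
        Int.emod_eq_of_lt hv hlt, Int.ediv_eq_zero_of_lt hv hlt]
    simp

theorem sacar2_spec : Claim_equal_sacar2 := by
  intro valor _
  unfold Spec_sacar2 sacar2 sacar2_alt
  by_cases h1 : valor ≤ 0
  · simp [h1]
  · have hm10 : PySem.Int.mod valor 10 = valor % 10 := PySem.Int.mod_eq_emod_of_pos (by norm_num)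
    rw [hm10]
    by_cases h2 : 0 < valor % 10
    · rw [if_neg h1, if_pos h2, if_pos (Or.inr h2)]
    · rw [if_neg h1, if_neg h2, if_neg (show ¬(valor ≤ 0 ∨ 0 < valor % 10) by omega)]
      have n1 : (0:Int) ≤ valor := by omega
      have m1 : 0 ≤ PySem.Int.mod valor 100 := by
        rw [PySem.Int.mod_eq_emod_of_pos (by norm_num)]; exact Int.emod_nonneg _ (by norm_num)
      have m2 : 0 ≤ PySem.Int.mod (PySem.Int.mod valor 100) 50 := by
        rw [PySem.Int.mod_eq_emod_of_pos (by norm_num)]; exact Int.emod_nonneg _ (by norm_num)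
      have m3 : 0 ≤ PySem.Int.mod (PySem.Int.mod (PySem.Int.mod valor 100) 50) 20 := by
        rw [PySem.Int.mod_eq_emod_of_pos (by norm_num)]; exact Int.emod_nonneg _ (by norm_num)
      simp only [List.foldl]
      rw [sacar2Loop_closed 100 _ (by norm_num) n1,
          sacar2Loop_closed 50 _ (by norm_num) m1,
          sacar2Loop_closed 20 _ (by norm_num) m2,
          sacar2Loop_closed 10 _ (by norm_num) m3]
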